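-- pv_equiv track=rewrite | github.com/LucaIT523/python_QRCode_Flask | pdf_qrcode_flask.py | full_search_sub_info
-- ===== SOURCE A (Python) =====
-- def full_search_sub_info(pdf_data, qr_info):
--     search_start = 0
--     page_str = ''
--
--     while True:
--         start_num, end_num, search_start = search_sub_info(pdf_data, qr_info, search_start)
--         if(int(search_start) < 0 ):
--             break
--         for i in range(start_num + 1, end_num + 2):
--             page_str = page_str + str(i) + ','
--
--     page_str = page_str[:len(page_str) - 1]
--     return page_str
--
-- def search_sub_info(pdf_data, qr_info, search_start):
--     data_len = len(pdf_data)
--     start_pos = -1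
--     end_pos = -1
--     b_find = False
--
--     for i in range(data_len) :
--         if i < int(search_start):
--             continue
--
--         if pdf_data[i][0] == qr_info:
--             b_find = True
--             if start_pos < 0 :
--                 start_pos = i
--             end_pos = i
--
--     if b_find == True:
--         # modify end_pos
--         if int(end_pos) == int(data_len) - 2:
--             if pdf_data[end_pos + 1][0] == '' and pdf_data[end_pos + 1][2] == 0  :
--                 end_pos += 1
--         elif int(end_pos) < int(data_len) - 2:
--             if pdf_data[end_pos + 1][0] == '' and pdf_data[end_pos + 1][2] == 0 and len(pdf_data[end_pos + 2][0]) > 0 :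
--                 end_pos += 1
--             if pdf_data[end_pos + 1][0] == '' and (pdf_data[end_pos][2] - pdf_data[end_pos][1]) > 0 and pdf_data[end_pos][2] > 1 :
--                 end_pos += pdf_data[end_pos][2] - pdf_data[end_pos][1]
--
--         # modify start_pos
--         if pdf_data[start_pos][1] > 1 and pdf_data[start_pos][2] == 0:
--             start_pos -= pdf_data[start_pos][1] - 1
--
--         elif pdf_data[start_pos][1] > 1 and pdf_data[start_pos][2] > 0:
--             if(pdf_data[start_pos][2] <= end_pos - start_pos):
--                 k = 0
--             else:
--                 start_pos -= pdf_data[start_pos][1] - 1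
--
--         return start_pos, end_pos, end_pos + 1
--
--     else:
--         return start_pos, end_pos, -1
-- ===== SOURCE B (Python) =====
-- def full_search_sub_info(pdf_data, qr_info):
--     idx = [i for i in range(len(pdf_data)) if pdf_data[i][0] == qr_info]
--     if not idx:
--         return ''
--     n = len(pdf_data)
--     start_pos, end_pos = idx[0], idx[-1]
--     # boundary adjustment of the matched range (same rules as the original)
--     if end_pos == n - 2:
--         if pdf_data[end_pos + 1][0] == '' and pdf_data[end_pos + 1][2] == 0:
--             end_pos += 1
--     elif end_pos < n - 2:
--         if pdf_data[end_pos + 1][0] == '' and pdf_data[end_pos + 1][2] == 0 and len(pdf_data[end_pos + 2][0]) > 0: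
--             end_pos += 1
--         if pdf_data[end_pos + 1][0] == '' and pdf_data[end_pos][2] - pdf_data[end_pos][1] > 0 and pdf_data[end_pos][2] > 1:
--             end_pos += pdf_data[end_pos][2] - pdf_data[end_pos][1]
--     first = pdf_data[start_pos]
--     if first[1] > 1 and (first[2] == 0 or (first[2] > 0 and first[2] > end_pos - start_pos)):
--         start_pos -= first[1] - 1
--     return ','.join(str(i) for i in range(start_pos + 1, end_pos + 2))
-- ===== Notes on version B (the rewrite author's own statement) =====
-- stated objective: simpler
-- what changed: B inlines A's two functions into one: a single comprehension finds the first/last matching index (replacing A's restartable scan inside a 'while True' loop, which provably runs only once), the same boundary adjustment is applied, and the page string is built with ','.join instead of repeated concatenation followed by a trailing-comma trim.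
import Mathlib
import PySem

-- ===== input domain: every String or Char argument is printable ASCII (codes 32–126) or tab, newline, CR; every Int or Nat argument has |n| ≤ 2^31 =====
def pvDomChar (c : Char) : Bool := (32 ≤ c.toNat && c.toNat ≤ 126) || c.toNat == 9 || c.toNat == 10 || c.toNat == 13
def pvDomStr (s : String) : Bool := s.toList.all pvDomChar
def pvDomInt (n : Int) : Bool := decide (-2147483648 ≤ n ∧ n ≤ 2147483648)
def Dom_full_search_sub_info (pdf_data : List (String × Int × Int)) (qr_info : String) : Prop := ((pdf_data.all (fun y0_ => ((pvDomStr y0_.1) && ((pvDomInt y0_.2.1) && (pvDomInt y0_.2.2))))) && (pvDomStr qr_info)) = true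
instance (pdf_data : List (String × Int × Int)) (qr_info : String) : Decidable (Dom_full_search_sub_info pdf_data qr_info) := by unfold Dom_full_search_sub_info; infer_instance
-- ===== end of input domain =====

-- B inlines A's two functions into one: it finds the first/last matching index with a single
-- comprehension (A's restartable scan loop disappears — the outer while provably runs once),
-- applies the same boundary adjustment, and builds the page list with ','.join instead of
-- append-then-trim.  Objective: simpler.  A never raises, so there is no Pre_.

-- ===== PORT A =====

def pvRec : String × Int × Int := ("", 0, 0)

-- pdf_data[i]: every index the code below reads is in range (end_pos/start_pos bounds are
-- established by the surrounding branch conditions), so the default is never returned and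
-- pyGetD is exact here.
def pvGetI (pdf : List (String × Int × Int)) (k : Int) : String × Int × Int :=
  PySem.List.pyGetD pdf k pvRec

-- body of 'for i in range(data_len)': skip i < search_start, else record start/end on a match
def pvStep (pdf : List (String × Int × Int)) (qr : String) (ss : Int)
    (st : Int × Int × Bool) (i : Int) : Int × Int × Bool :=
  if i < ss then st
  else if (pvGetI pdf i).1 = qr then
    (if st.1 < 0 then i else st.1, i, true)
  else st

def pvScan (pdf : List (String × Int × Int)) (qr : String) (ss : Int) : Int × Int × Bool :=
  (PySem.List.pyRange 0 pdf.length).foldl (pvStep pdf qr ss) (-1, -1, false)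

-- the '# modify end_pos' block of search_sub_info
def pvAdjEnd (pdf : List (String × Int × Int)) (n ep : Int) : Int :=
  if ep = n - 2 then
    if (pvGetI pdf (ep + 1)).1 = "" ∧ (pvGetI pdf (ep + 1)).2.2 = 0 then ep + 1 else ep
  else if ep < n - 2 then
    let e := if (pvGetI pdf (ep + 1)).1 = "" ∧ (pvGetI pdf (ep + 1)).2.2 = 0 ∧
                0 < PySem.Str.len (pvGetI pdf (ep + 2)).1 then ep + 1 else ep
    if (pvGetI pdf (e + 1)).1 = "" ∧ 0 < (pvGetI pdf e).2.2 - (pvGetI pdf e).2.1 ∧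
        1 < (pvGetI pdf e).2.2
    then e + ((pvGetI pdf e).2.2 - (pvGetI pdf e).2.1) else e
  else ep

-- the '# modify start_pos' block of search_sub_info
def pvAdjStart (pdf : List (String × Int × Int)) (sp ep : Int) : Int :=
  if 1 < (pvGetI pdf sp).2.1 ∧ (pvGetI pdf sp).2.2 = 0 then sp - ((pvGetI pdf sp).2.1 - 1)
  else if 1 < (pvGetI pdf sp).2.1 ∧ 0 < (pvGetI pdf sp).2.2 then
    if (pvGetI pdf sp).2.2 ≤ ep - sp then sp else sp - ((pvGetI pdf sp).2.1 - 1)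
  else sp

def search_sub_info (pdf : List (String × Int × Int)) (qr : String) (ss : Int) :
    Int × Int × Int :=
  let r := pvScan pdf qr ss
  if r.2.2 then
    let ep := pvAdjEnd pdf (pdf.length : Int) r.2.1
    (pvAdjStart pdf r.1 ep, ep, ep + 1)
  else (r.1, r.2.1, -1)

-- termination facts for the 'while True' loop (cited by pvA_loop's decreasing_by)
theorem pvScan_found_bounds (pdf : List (String × Int × Int)) (qr : String) (ss : Int)
    (P : Int → Prop) (hP : ∀ i, ss ≤ i → 0 ≤ i → i < (pdf.length : Int) → P i)
    (h : (pvScan pdf qr ss).2.2 = true) : P (pvScan pdf qr ss).2.1 := by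
  have key : ∀ (l : List Int) (st : Int × Int × Bool),
      (∀ i ∈ l, ss ≤ i → 0 ≤ i → i < (pdf.length : Int) → P i) →
      (∀ i ∈ l, 0 ≤ i ∧ i < (pdf.length : Int)) →
      (st.2.2 = true → P st.2.1) →
      ((l.foldl (pvStep pdf qr ss) st).2.2 = true → P (l.foldl (pvStep pdf qr ss) st).2.1) := by
    intro l
    induction l with
    | nil => intro st _ _ hst; simpa using hst
    | cons a t ih =>
      intro st hPl hbnd hst
      simp only [List.foldl_cons]
      refine ih _ (fun i hi => hPl i (by simp [hi])) (fun i hi => hbnd i (by simp [hi])) ?_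
      intro hfound
      unfold pvStep
      unfold pvStep at hfound
      by_cases h1 : a < ss
      · simp only [if_pos h1] at hfound ⊢; exact hst hfound
      · by_cases h2 : (pvGetI pdf a).1 = qr
        · simp only [if_neg h1, if_pos h2]
          exact hPl a (by simp) (by omega) (hbnd a (by simp)).1 (hbnd a (by simp)).2
        · simp only [if_neg h1, if_neg h2] at hfound ⊢; exact hst hfound
  unfold pvScan at h ⊢
  refine key _ _ (fun i _ => hP i) (fun i hi => ?_) (by simp) h
  have := PySem.List.mem_pyRange_one.mp hi; omega

theorem le_pvAdjEnd (pdf : List (String × Int × Int)) (n ep : Int) : ep ≤ pvAdjEnd pdf n ep := by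
  simp only [pvAdjEnd]
  split_ifs <;> omega

theorem pvA_next (pdf : List (String × Int × Int)) (qr : String) (ss : Int)
    (h : ¬ (search_sub_info pdf qr ss).2.2 < 0) :
    ((pdf.length : Int) + 1 - (search_sub_info pdf qr ss).2.2).toNat <
      ((pdf.length : Int) + 1 - ss).toNat := by
  unfold search_sub_info at h ⊢
  by_cases hf : (pvScan pdf qr ss).2.2 = true
  · simp only [hf, if_true] at h ⊢
    have hb := pvScan_found_bounds pdf qr ss
      (fun e => ss ≤ e ∧ 0 ≤ e ∧ e < (pdf.length : Int)) (fun i h1 h2 h3 => ⟨h1, h2, h3⟩) hf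
    have hle := le_pvAdjEnd pdf (pdf.length : Int) (pvScan pdf qr ss).2.1
    rw [Int.toNat_lt_toNat (by omega)]
    omega
  · simp only [hf] at h; simp at h

def pvA_loop (pdf : List (String × Int × Int)) (qr : String) (ss : Int) (page : String) :
    String :=
  let r := search_sub_info pdf qr ss
  if h : r.2.2 < 0 then page
  else
    pvA_loop pdf qr r.2.2
      ((PySem.List.pyRange (r.1 + 1) (r.2.1 + 2)).foldl
        (fun s i => s ++ PySem.Int.toStr i ++ ",") page)
termination_by ((pdf.length : Int) + 1 - ss).toNat
decreasing_by exact pvA_next pdf qr ss h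

def full_search_sub_info (pdf_data : List (String × Int × Int)) (qr_info : String) : String :=
  let page_str := pvA_loop pdf_data qr_info 0 ""
  PySem.Str.slice page_str none (some (PySem.Str.len page_str - 1))

-- ===== PORT B =====

-- same boundary-adjustment rules, kept verbatim in Source B (end block identical, start block
-- written as one merged condition)
def pvBAdjEnd (pdf : List (String × Int × Int)) (n ep : Int) : Int :=
  if ep = n - 2 then
    if (pvGetI pdf (ep + 1)).1 = "" ∧ (pvGetI pdf (ep + 1)).2.2 = 0 then ep + 1 else ep
  else if ep < n - 2 then
    let e := if (pvGetI pdf (ep + 1)).1 = "" ∧ (pvGetI pdf (ep + 1)).2.2 = 0 ∧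
                0 < PySem.Str.len (pvGetI pdf (ep + 2)).1 then ep + 1 else ep
    if (pvGetI pdf (e + 1)).1 = "" ∧ 0 < (pvGetI pdf e).2.2 - (pvGetI pdf e).2.1 ∧
        1 < (pvGetI pdf e).2.2
    then e + ((pvGetI pdf e).2.2 - (pvGetI pdf e).2.1) else e
  else ep

def pvBAdjStart (pdf : List (String × Int × Int)) (sp ep : Int) : Int :=
  let first := pvGetI pdf sp
  if 1 < first.2.1 ∧ (first.2.2 = 0 ∨ (0 < first.2.2 ∧ ep - sp < first.2.2)) then
    sp - (first.2.1 - 1)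
  else sp

def full_search_sub_info_alt (pdf_data : List (String × Int × Int)) (qr_info : String) :
    String :=
  let idx := (PySem.List.pyRange 0 pdf_data.length).filter
    (fun i => decide ((PySem.List.pyGetD pdf_data i pvRec).1 = qr_info))
  if idx.isEmpty then ""
  else
    let start_pos := PySem.List.pyGetD idx 0 0
    let end_pos := PySem.List.pyGetD idx (-1) 0
    let ep := pvBAdjEnd pdf_data (pdf_data.length : Int) end_pos
    let sp := pvBAdjStart pdf_data start_pos ep
    PySem.Str.join "," ((PySem.List.pyRange (sp + 1) (ep + 2)).map PySem.Int.toStr)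

-- ===== PRECONDITION & SPEC =====
def Spec_full_search_sub_info (pdf_data : List (String × Int × Int)) (qr_info : String) (out : String) : Prop := out = full_search_sub_info_alt pdf_data qr_info
instance (pdf_data : List (String × Int × Int)) (qr_info : String) (out : String) : Decidable (Spec_full_search_sub_info pdf_data qr_info out) := by unfold Spec_full_search_sub_info; infer_instance

-- ===== CLAIM (what is proved, stated in full; the proofs are below) =====
def Claim_equal_full_search_sub_info : Prop := ∀ (pdf_data : List (String × Int × Int)) (qr_info : String), Dom_full_search_sub_info pdf_data qr_info → Spec_full_search_sub_info pdf_data qr_info (full_search_sub_info pdf_data qr_info)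

-- ===== LEMMAS AND PROOFS =====

-- the indices A's scan at search_start = ss actually records
def pvM (pdf : List (String × Int × Int)) (qr : String) (ss : Int) : List Int :=
  (PySem.List.pyRange 0 pdf.length).filter
    (fun i => decide (¬ i < ss ∧ (pvGetI pdf i).1 = qr))

theorem pv_fold_true (pdf : List (String × Int × Int)) (qr : String) (ss : Int)
    (l : List Int) :
    ∀ (s e : Int), 0 ≤ s →
      l.foldl (pvStep pdf qr ss) (s, e, true)
        = (s, (l.filter (fun i => decide (¬ i < ss ∧ (pvGetI pdf i).1 = qr))).getLastD e,
            true) := by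
  induction l with
  | nil => intro s e _; simp
  | cons a t ih =>
    intro s e hs
    by_cases h1 : a < ss
    · have hq : (decide (¬ a < ss ∧ (pvGetI pdf a).1 = qr)) = false := by simp [h1]
      simp only [List.foldl_cons, List.filter_cons, hq, Bool.false_eq_true, if_false]
      rw [show pvStep pdf qr ss (s, e, true) a = (s, e, true) by simp [pvStep, h1]]
      exact ih s e hs
    · by_cases h2 : (pvGetI pdf a).1 = qr
      · have hq : (decide (¬ a < ss ∧ (pvGetI pdf a).1 = qr)) = true := by simp [h1, h2]
        simp only [List.foldl_cons, List.filter_cons, hq, if_true]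
        rw [show pvStep pdf qr ss (s, e, true) a = (s, a, true) by
          simp [pvStep, h1, h2, show ¬ s < 0 by omega]]
        rw [ih s a hs, List.getLastD_cons]
      · have hq : (decide (¬ a < ss ∧ (pvGetI pdf a).1 = qr)) = false := by simp [h1, h2]
        simp only [List.foldl_cons, List.filter_cons, hq, Bool.false_eq_true, if_false]
        rw [show pvStep pdf qr ss (s, e, true) a = (s, e, true) by simp [pvStep, h1, h2]]
        exact ih s e hs

theorem pv_fold_init (pdf : List (String × Int × Int)) (qr : String) (ss : Int)
    (l : List Int) (hl : ∀ i ∈ l, 0 ≤ i) :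
    l.foldl (pvStep pdf qr ss) (-1, -1, false)
      = match l.filter (fun i => decide (¬ i < ss ∧ (pvGetI pdf i).1 = qr)) with
        | [] => (-1, -1, false)
        | i0 :: rest => (i0, rest.getLastD i0, true) := by
  induction l with
  | nil => simp
  | cons a t ih =>
    by_cases hq : (¬ a < ss ∧ (pvGetI pdf a).1 = qr)
    · have hq' : (decide (¬ a < ss ∧ (pvGetI pdf a).1 = qr)) = true := by simp [hq.1, hq.2]
      simp only [List.foldl_cons, List.filter_cons, hq', if_true]
      rw [show pvStep pdf qr ss (-1, -1, false) a = (a, a, true) by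
        simp [pvStep, hq.1, hq.2]]
      rw [pv_fold_true pdf qr ss t a a (hl a (by simp))]
    · have hq' : (decide (¬ a < ss ∧ (pvGetI pdf a).1 = qr)) = false := by
        simpa using hq
      simp only [List.foldl_cons, List.filter_cons, hq', Bool.false_eq_true, if_false]
      have hstep : pvStep pdf qr ss (-1, -1, false) a = (-1, -1, false) := by
        by_cases h1 : a < ss
        · simp [pvStep, h1]
        · have h2 : ¬ (pvGetI pdf a).1 = qr := by tauto
          simp [pvStep, h1, h2]
      rw [hstep]
      exact ih (fun i hi => hl i (by simp [hi]))

theorem pvScan_char (pdf : List (String × Int × Int)) (qr : String) (ss : Int) :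
    pvScan pdf qr ss =
      match pvM pdf qr ss with
      | [] => (-1, -1, false)
      | i0 :: rest => (i0, rest.getLastD i0, true) := by
  unfold pvScan pvM
  exact pv_fold_init pdf qr ss _ (fun i hi => (PySem.List.mem_pyRange_one.mp hi).1)

theorem pvScan_eq_of_no_match (pdf : List (String × Int × Int)) (qr : String) (ss : Int)
    (h : pvM pdf qr ss = []) : pvScan pdf qr ss = (-1, -1, false) := by
  rw [pvScan_char, h]

theorem pv_pairwise_le_getLastD :
    ∀ (rest : List Int) (i0 : Int), (i0 :: rest).Pairwise (· < ·) →
      ∀ i ∈ i0 :: rest, i ≤ rest.getLastD i0 := by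
  intro rest
  induction rest with
  | nil => intro i0 _ i hi; simp at hi; simp [hi]
  | cons b t ih =>
    intro i0 hpair i hi
    rw [List.getLastD_cons]
    have hpair' : (b :: t).Pairwise (· < ·) := hpair.of_cons
    rcases List.mem_cons.mp hi with h0 | h1
    · have hib : i0 < b := (List.pairwise_cons.mp hpair).1 b (by simp)
      have := ih b hpair' b (by simp)
      omega
    · exact ih b hpair' i h1

theorem pvM_last_max (pdf : List (String × Int × Int)) (qr : String) (ss : Int)
    (i0 : Int) (rest : List Int) (h : pvM pdf qr ss = i0 :: rest) :
    ∀ i ∈ pvM pdf qr ss, i ≤ rest.getLastD i0 := by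
  have hpair : (pvM pdf qr ss).Pairwise (· < ·) :=
    (PySem.List.pairwise_lt_pyRange_one 0 pdf.length).filter _
  rw [h] at hpair ⊢
  exact pv_pairwise_le_getLastD rest i0 hpair

theorem pvAdjEnd_eq_B (pdf : List (String × Int × Int)) (n ep : Int) :
    pvAdjEnd pdf n ep = pvBAdjEnd pdf n ep := rfl

theorem pvAdjStart_eq_B (pdf : List (String × Int × Int)) (sp ep : Int) :
    pvAdjStart pdf sp ep = pvBAdjStart pdf sp ep := by
  simp only [pvAdjStart, pvBAdjStart]
  split_ifs <;> first | rfl | omega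

theorem pv_foldl_commas_toList (l : List Int) (acc : String) :
    (l.foldl (fun s i => s ++ PySem.Int.toStr i ++ ",") acc).toList
      = acc.toList ++ (l.map (fun i => (PySem.Int.toStr i).toList ++ [','])).flatten := by
  induction l generalizing acc with
  | nil => simp
  | cons a t ih => simp [ih, String.toList_append]

theorem pv_trim_toList (s : String) :
    (PySem.Str.slice s none (some (PySem.Str.len s - 1))).toList = s.toList.dropLast := by
  rw [PySem.Str.len_eq, PySem.Str.toList_slice]
  by_cases h0 : s.toList.length = 0
  · rw [h0, show ((0 : Nat) : Int) - 1 = -1 by norm_num]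
    exact PySem.List.slice_to_neg_one s.toList
  · have h1 : PySem.Chars.slice s.toList none (some ((s.toList.length : Int) - 1))
        = s.toList.take ((s.toList.length : Int) - 1).toNat :=
      PySem.List.slice_to s.toList (by omega)
    rw [h1, show ((s.toList.length : Int) - 1).toNat = s.toList.length - 1 by omega]
    exact List.dropLast_eq_take.symm

theorem pv_flatten_commas_dropLast (parts : List (List Char)) :
    ((parts.map (fun p => p ++ [','])).flatten).dropLast = PySem.Chars.join [','] parts := by
  induction parts with
  | nil => simp [PySem.Chars.join_nil]
  | cons p rest ih =>
    cases rest with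
    | nil => simp [PySem.Chars.join_singleton]
    | cons q rest' =>
      rw [PySem.Chars.join_cons_cons]
      simp only [List.map_cons, List.flatten_cons]
      rw [List.dropLast_append_of_ne_nil (by simp)]
      simp only [List.map_cons, List.flatten_cons] at ih
      rw [ih]

theorem pv_trim_join (l : List Int) :
    PySem.Str.slice (l.foldl (fun s i => s ++ PySem.Int.toStr i ++ ",") "") none
        (some (PySem.Str.len (l.foldl (fun s i => s ++ PySem.Int.toStr i ++ ",") "") - 1))
      = PySem.Str.join "," (l.map PySem.Int.toStr) := by
  apply String.toList_inj.mp
  rw [pv_trim_toList, pv_foldl_commas_toList, PySem.Str.toList_join]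
  rw [show String.toList "" = [] from rfl, List.nil_append]
  rw [show String.toList "," = [','] from rfl]
  have h := pv_flatten_commas_dropLast (l.map (fun i => (PySem.Int.toStr i).toList))
  simp only [List.map_map, Function.comp_def] at h ⊢
  exact h

-- ===== VERDICT (by name: the statement is the Claim_ definition above) =====
theorem full_search_sub_info_spec : Claim_equal_full_search_sub_info := by
  intro pdf qr _hDom
  unfold Spec_full_search_sub_info
  have hidx : (PySem.List.pyRange 0 pdf.length).filter
      (fun i => decide ((PySem.List.pyGetD pdf i pvRec).1 = qr)) = pvM pdf qr 0 := by
    unfold pvM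
    apply List.filter_congr
    intro i hi
    have hb := PySem.List.mem_pyRange_one.mp hi
    rw [decide_eq_decide]
    unfold pvGetI
    exact ⟨fun h => ⟨by omega, h⟩, fun h => h.2⟩
  cases hm : pvM pdf qr 0 with
  | nil =>
    have hscan := pvScan_eq_of_no_match pdf qr 0 hm
    have hsearch : search_sub_info pdf qr 0 = (-1, -1, -1) := by
      simp only [search_sub_info, hscan]
      simp
    have hloop : pvA_loop pdf qr 0 "" = "" := by
      rw [pvA_loop, hsearch]
      norm_num
    have hA : full_search_sub_info pdf qr = "" := by
      simp only [full_search_sub_info]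
      rw [hloop]
      decide
    have hB : full_search_sub_info_alt pdf qr = "" := by
      simp only [full_search_sub_info_alt]
      rw [hidx, hm]
      rfl
    rw [hA, hB]
  | cons i0 rest =>
    have hscan : pvScan pdf qr 0 = (i0, rest.getLastD i0, true) := by
      rw [pvScan_char, hm]
    have hLmem : rest.getLastD i0 ∈ pvM pdf qr 0 := by
      rw [hm, ← List.getLast_eq_getLastD (List.cons_ne_nil i0 rest)]
      exact List.getLast_mem _
    have hLrange : 0 ≤ rest.getLastD i0 ∧ rest.getLastD i0 < (pdf.length : Int) := by
      have := (List.mem_filter.mp (by unfold pvM at hLmem; exact hLmem)).1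
      exact PySem.List.mem_pyRange_one.mp this
    have hmax := pvM_last_max pdf qr 0 i0 rest hm
    set ep := pvAdjEnd pdf (pdf.length : Int) (rest.getLastD i0) with hep
    set sp := pvAdjStart pdf i0 ep with hsp
    have hepge : rest.getLastD i0 ≤ ep := le_pvAdjEnd pdf _ _
    have hsearch : search_sub_info pdf qr 0 = (sp, ep, ep + 1) := by
      simp only [search_sub_info, hscan]
      rw [if_pos trivial]
    have hloop1 : pvA_loop pdf qr 0 "" =
        pvA_loop pdf qr (ep + 1)
          ((PySem.List.pyRange (sp + 1) (ep + 2)).foldl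
            (fun s i => s ++ PySem.Int.toStr i ++ ",") "") := by
      rw [pvA_loop, hsearch]
      rw [dif_neg (by rw [show ((sp, ep, ep + 1) : Int × Int × Int).2.2 = ep + 1 from rfl]; omega)]
    have hm2 : pvM pdf qr (ep + 1) = [] := by
      unfold pvM
      rw [List.filter_eq_nil_iff]
      intro i hi
      simp only [decide_eq_true_eq, not_and]
      intro hge
      by_contra hmatch
      have himem : i ∈ pvM pdf qr 0 := by
        unfold pvM
        rw [List.mem_filter]
        refine ⟨hi, ?_⟩
        simp only [decide_eq_true_eq]
        have := PySem.List.mem_pyRange_one.mp hi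
        exact ⟨by omega, by tauto⟩
      have := hmax i himem
      omega
    have hscan2 := pvScan_eq_of_no_match pdf qr (ep + 1) hm2
    have hsearch2 : search_sub_info pdf qr (ep + 1) = (-1, -1, -1) := by
      simp only [search_sub_info, hscan2]
      simp
    have hloop2 : ∀ page, pvA_loop pdf qr (ep + 1) page = page := by
      intro page
      rw [pvA_loop, hsearch2]
      norm_num
    have hA : full_search_sub_info pdf qr
        = PySem.Str.join ","
            ((PySem.List.pyRange (sp + 1) (ep + 2)).map PySem.Int.toStr) := by
      simp only [full_search_sub_info]
      rw [hloop1, hloop2]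
      exact pv_trim_join _
    have hB : full_search_sub_info_alt pdf qr
        = PySem.Str.join ","
            ((PySem.List.pyRange (sp + 1) (ep + 2)).map PySem.Int.toStr) := by
      simp only [full_search_sub_info_alt]
      rw [hidx, hm]
      rw [show (i0 :: rest).isEmpty = false from rfl]
      simp only [Bool.false_eq_true, if_false]
      rw [PySem.List.pyGetD_neg_one (i0 :: rest) 0 (List.cons_ne_nil i0 rest)]
      rw [List.getLast_eq_getLastD]
      rw [show PySem.List.pyGetD (i0 :: rest) 0 0 = i0 from PySem.List.pyGetD_zero_cons i0 rest 0]
      rw [← pvAdjEnd_eq_B, ← pvAdjStart_eq_B]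
    rw [hA, hB]
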